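-- pv_equiv track=rewrite | github.com/yw346380873-sketch/Vibe-Skills | bundled/skills/knowledge-steward/scripts/distill_experience.py | get_date_range
-- ===== SOURCE A (Python) =====
-- from typing import Dict, List, Any
--
-- def get_date_range(reports: List[Dict[str, Any]]) -> Dict[str, str]:
--     """获取报告的日期范围"""
--     dates = []
--     for report in reports:
--         date = report.get('metadata', {}).get('date', '')
--         if date:
--             dates.append(date)
--
--     if dates:
--         return {
--             'start': min(dates),
--             'end': max(dates)
--         }
--     return {'start': '', 'end': ''}
-- ===== SOURCE B (Python) =====
-- def _step(acc, date):
--     """Fold one date into the running (start, end) pair (None = nothing seen yet)."""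
--     if acc is None:
--         return (date, date)
--     s, e = acc
--     return (date if date < s else s, date if date > e else e)
--
-- def get_date_range(reports):
--     """获取报告的日期范围 — single pass with a running (min, max) pair instead of building a list."""
--     acc = None
--     for report in reports:
--         date = report.get('metadata', {}).get('date', '')
--         if date:
--             acc = _step(acc, date)
--     if acc is None:
--         return {'start': '', 'end': ''}
--     return {'start': acc[0], 'end': acc[1]}
-- ===== Notes on version B (the rewrite author's own statement) =====
-- stated objective: simpler
-- what changed: B makes one pass keeping a running min/max pair instead of first building a list of dates and then scanning it twice with min() and max().
import Mathlib
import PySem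

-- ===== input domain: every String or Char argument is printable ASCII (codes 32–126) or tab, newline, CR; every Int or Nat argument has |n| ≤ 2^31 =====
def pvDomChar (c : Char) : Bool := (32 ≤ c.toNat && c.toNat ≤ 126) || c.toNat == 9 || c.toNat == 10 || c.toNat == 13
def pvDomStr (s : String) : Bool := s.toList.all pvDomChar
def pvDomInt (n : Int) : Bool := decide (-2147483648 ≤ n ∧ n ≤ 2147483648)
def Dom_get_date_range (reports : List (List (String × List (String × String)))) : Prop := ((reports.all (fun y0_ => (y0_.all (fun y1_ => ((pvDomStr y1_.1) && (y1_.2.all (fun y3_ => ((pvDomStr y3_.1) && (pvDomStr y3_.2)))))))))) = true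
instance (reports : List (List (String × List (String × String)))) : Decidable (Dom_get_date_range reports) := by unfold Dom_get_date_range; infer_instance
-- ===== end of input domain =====

-- B makes a single pass keeping a running (start, end) pair instead of building a list of
-- dates and scanning it twice with min() and max(); objective: simpler.

-- shared helper: report.get('metadata', {}).get('date', '')
def pvDate (report : List (String × List (String × String))) : String :=
  (PySem.Dict.mk ((PySem.Dict.mk report).getD "metadata" [])).getD "date" ""

-- ===== PORT A =====
def get_date_range (reports : List (List (String × List (String × String)))) : List (String × String) :=
  match reports.foldl (fun dates report =>
      if pvDate report ≠ "" then dates ++ [pvDate report] else dates) [] with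
  | [] => [("start", ""), ("end", "")]
  -- min(dates) / max(dates) on the nonempty list; the .getD "" default is unreachable
  | d :: t => [("start", (PySem.List.min? (d :: t) (fun y => y)).getD ""),
               ("end",   (PySem.List.max? (d :: t) (fun y => y)).getD "")]

-- ===== PORT B =====
-- B's helper _step: fold one date into the running (start, end) pair (none = nothing seen yet)
def pvStep (acc : Option (String × String)) (date : String) : Option (String × String) :=
  match acc with
  | none => some (date, date)
  | some (s, e) => some ((if date < s then date else s), (if e < date then date else e))

def get_date_range_alt (reports : List (List (String × List (String × String)))) : List (String × String) :=
  match reports.foldl (fun acc report =>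
      if pvDate report = "" then acc else pvStep acc (pvDate report)) none with
  | none => [("start", ""), ("end", "")]
  | some (s, e) => [("start", s), ("end", e)]

-- ===== PRECONDITION & SPEC =====
def Spec_get_date_range (reports : List (List (String × List (String × String)))) (out : List (String × String)) : Prop := out = get_date_range_alt reports
instance (reports : List (List (String × List (String × String)))) (out : List (String × String)) : Decidable (Spec_get_date_range reports out) := by unfold Spec_get_date_range; infer_instance

-- ===== CLAIM (what is proved, stated in full; the proofs are below) =====
def Claim_equal_get_date_range : Prop := ∀ (reports : List (List (String × List (String × String)))), Dom_get_date_range reports → Spec_get_date_range reports (get_date_range reports)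

-- ===== LEMMAS AND PROOFS =====

-- the nonempty dates, in order
def pvDates (reports : List (List (String × List (String × String)))) : List String :=
  (reports.map pvDate).filter (fun d => d ≠ "")

theorem pvStep_none (d : String) : pvStep none d = some (d, d) := rfl

theorem A_fold_eq (reports : List (List (String × List (String × String))))
    (init : List String) :
    reports.foldl (fun dates report =>
      if pvDate report ≠ "" then dates ++ [pvDate report] else dates) init
      = init ++ pvDates reports := by
  induction reports generalizing init with
  | nil => simp [pvDates]
  | cons r rs ih =>
    simp only [List.foldl_cons]
    by_cases h : pvDate r = ""
    · rw [if_neg (by simpa using h), ih]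
      simp [pvDates, h]
    · rw [if_pos h, ih]
      simp [pvDates, h]

theorem B_fold_eq (reports : List (List (String × List (String × String))))
    (acc : Option (String × String)) :
    reports.foldl (fun acc report =>
      if pvDate report = "" then acc else pvStep acc (pvDate report)) acc
      = (pvDates reports).foldl pvStep acc := by
  induction reports generalizing acc with
  | nil => simp [pvDates]
  | cons r rs ih =>
    simp only [List.foldl_cons]
    by_cases h : pvDate r = ""
    · rw [if_pos h, ih]
      simp [pvDates, h]
    · rw [if_neg h, ih]
      simp [pvDates, pvStep, h]

theorem upd_fold_pair (t : List String) (s e : String) :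
    t.foldl pvStep (some (s, e)) =
      some (t.foldl (fun s x => if x < s then x else s) s,
            t.foldl (fun e x => if e < x then x else e) e) := by
  induction t generalizing s e with
  | nil => rfl
  | cons x xs ih => simp [pvStep, ih]

theorem foldl_min_eq (t : List String) (d : String) :
    t.foldl min d = t.foldl (fun s x => if x < s then x else s) d := by
  induction t generalizing d with
  | nil => rfl
  | cons x xs ih =>
    simp only [List.foldl_cons, ih]
    congr 1
    by_cases h : x < d
    · simp [min_def, h, not_le.2 h]
    · simp [h, le_of_not_gt h]

theorem foldl_max_eq (t : List String) (d : String) :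
    t.foldl max d = t.foldl (fun e x => if e < x then x else e) d := by
  induction t generalizing d with
  | nil => rfl
  | cons x xs ih =>
    simp only [List.foldl_cons, ih]
    congr 1
    by_cases h : d < x
    · simp [h, le_of_lt h]
    · simp [h, le_of_not_gt h]

-- ===== VERDICT (by name: the statement is the Claim_ definition above) =====
theorem get_date_range_spec : Claim_equal_get_date_range := by
  intro reports _
  show get_date_range reports = get_date_range_alt reports
  unfold get_date_range get_date_range_alt
  rw [A_fold_eq, B_fold_eq, List.nil_append]
  cases hds : pvDates reports with
  | nil => rfl
  | cons d t =>
    simp only [PySem.List.min?_id_cons, PySem.List.max?_id_cons, List.foldl_cons, pvStep_none,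
      upd_fold_pair, Option.getD_some, foldl_min_eq, foldl_max_eq]
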